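-- pv_equiv track=rewrite | github.com/DarkAlexWang/leetcode | Microsoft/OnlineAssessment/minimum_delete.py | minimum_delete
-- ===== SOURCE A (Python) =====
-- def minimum_delete(s):
--     aSum, bSum = 0, 0
--     for c in s:
--         if c == 'A':
--             aSum += 1
--         else:
--             aSum = min(aSum, bSum)
--             bSum += 1
--     return min(aSum, bSum)
-- ===== SOURCE B (Python) =====
-- def minimum_delete(s):
--     total_a = sum(1 for c in s if c == 'A')
--     b_before, a_after = 0, total_a
--     best = total_a
--     for c in s:
--         if c == 'A':
--             a_after -= 1
--         else:
--             b_before += 1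
--         if b_before + a_after < best:
--             best = b_before + a_after
--     return best
-- ===== Notes on version B (the rewrite author's own statement) =====
-- stated objective: alternative
-- what changed: Replaces the two-register incremental DP with a split-point minimization: count the A's once, then one scan minimizes (non-A's before the cut) + (A's after the cut) over all cut positions.
import Mathlib
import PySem

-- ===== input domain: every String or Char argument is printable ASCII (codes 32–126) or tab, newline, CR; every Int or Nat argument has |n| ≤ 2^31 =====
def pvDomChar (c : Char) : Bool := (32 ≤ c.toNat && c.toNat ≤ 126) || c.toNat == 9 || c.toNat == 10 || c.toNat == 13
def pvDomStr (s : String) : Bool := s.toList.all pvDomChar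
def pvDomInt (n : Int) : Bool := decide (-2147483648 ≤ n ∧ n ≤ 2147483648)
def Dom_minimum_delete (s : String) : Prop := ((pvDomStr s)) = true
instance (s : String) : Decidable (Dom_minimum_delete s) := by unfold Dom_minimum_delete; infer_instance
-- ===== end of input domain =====

-- B replaces A's two-register incremental DP by a split-point minimization (count A's once, then
-- minimize non-A-prefix + A-suffix over all cuts); same O(n) cost, different decomposition.


-- ===== PORT A =====
-- A's loop body: 'if c == "A": aSum += 1 else: aSum = min(aSum, bSum); bSum += 1' on state (aSum, bSum)
def mdStepA (p : Int × Int) (c : Char) : Int × Int :=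
  if c == 'A' then (p.1 + 1, p.2) else (min p.1 p.2, p.2 + 1)

def minimum_delete (s : String) : Int :=
  let st := s.toList.foldl mdStepA ((0 : Int), (0 : Int))
  min st.1 st.2

-- ===== PORT B =====
-- B's loop body on state (b_before, a_after, best)
def mdStepB (p : Int × Int × Int) (c : Char) : Int × Int × Int :=
  let b := if c == 'A' then p.1 else p.1 + 1
  let a := if c == 'A' then p.2.1 - 1 else p.2.1
  (b, a, if b + a < p.2.2 then b + a else p.2.2)

def minimum_delete_alt (s : String) : Int :=
  let totalA : Int := s.toList.foldl (fun n c => if c == 'A' then n + 1 else n) 0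
  (s.toList.foldl mdStepB ((0 : Int), totalA, totalA)).2.2

-- ===== PRECONDITION & SPEC =====
def Spec_minimum_delete (s : String) (out : Int) : Prop := out = minimum_delete_alt s
instance (s : String) (out : Int) : Decidable (Spec_minimum_delete s out) := by unfold Spec_minimum_delete; infer_instance

-- ===== CLAIM (what is proved, stated in full; the proofs are below) =====
def Claim_equal_minimum_delete : Prop := ∀ (s : String), Dom_minimum_delete s → Spec_minimum_delete s (minimum_delete s)

-- ===== LEMMAS AND PROOFS =====

-- number of 'A' characters, as an Int
def cntA (l : List Char) : Int := (l.count 'A' : Int)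

-- the common mathematical value: min over all cut points of (non-A before the cut) + (A's after)
def mdSpec : List Char → Int
  | [] => 0
  | c :: l => min (cntA (c :: l)) ((if c == 'A' then (0 : Int) else 1) + mdSpec l)

theorem cntA_nil : cntA [] = 0 := rfl

theorem cntA_cons (c : Char) (l : List Char) :
    cntA (c :: l) = (if c == 'A' then (1 : Int) else 0) + cntA l := by
  simp only [cntA, List.count_cons]
  by_cases h : c = 'A' <;> first | (simp [h]; omega) | simp [h]

theorem mdSpec_le (l : List Char) : mdSpec l ≤ cntA l := by
  cases l with
  | nil => simp [mdSpec, cntA_nil]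
  | cons c l => exact min_le_left _ _

theorem foldA_eq (l : List Char) : ∀ (a b : Int),
    min (l.foldl mdStepA (a, b)).1 (l.foldl mdStepA (a, b)).2
      = min (a + cntA l) (b + mdSpec l) := by
  induction l with
  | nil => intro a b; simp [mdSpec, cntA_nil]
  | cons c l ih =>
    intro a b
    have hs := mdSpec_le l
    by_cases h : c = 'A'
    · rw [List.foldl_cons, show mdStepA (a, b) c = (a + 1, b) by simp [mdStepA, h], ih]
      simp only [cntA_cons, mdSpec, h, beq_self_eq_true, if_true]
      omega
    · rw [List.foldl_cons, show mdStepA (a, b) c = (min a b, b + 1) by simp [mdStepA, h], ih]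
      simp only [cntA_cons, mdSpec, beq_iff_eq, h, if_false]
      omega

theorem foldB_eq (l : List Char) : ∀ (b a best : Int), best ≤ b + a →
    (l.foldl mdStepB (b, a, best)).2.2 = min best (b + (a - cntA l) + mdSpec l) := by
  induction l with
  | nil => intro b a best h; simp only [List.foldl_nil, mdSpec, cntA_nil]; omega
  | cons c l ih =>
    intro b a best h
    have hs := mdSpec_le l
    by_cases hc : c = 'A'
    · rw [List.foldl_cons,
        show mdStepB (b, a, best) c = (b, a - 1, if b + (a - 1) < best then b + (a - 1) else best) by
          simp [mdStepB, hc],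
        ih _ _ _ (by split_ifs <;> omega)]
      simp only [cntA_cons, mdSpec, hc, beq_self_eq_true, if_true]
      split_ifs <;> omega
    · rw [List.foldl_cons,
        show mdStepB (b, a, best) c = (b + 1, a, if b + 1 + a < best then b + 1 + a else best) by
          simp [mdStepB, hc],
        ih _ _ _ (by split_ifs <;> omega)]
      simp only [cntA_cons, mdSpec, beq_iff_eq, hc, if_false]
      split_ifs <;> omega

theorem totalA_eq (l : List Char) :
    l.foldl (fun n c => if c == 'A' then n + 1 else n) (0 : Int) = cntA l := by
  rw [PySem.List.foldl_beq_add_one]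
  simp [cntA]

-- ===== VERDICT (by name: the statement is the Claim_ definition above) =====
theorem minimum_delete_spec : Claim_equal_minimum_delete := by
  intro s _
  unfold Spec_minimum_delete minimum_delete minimum_delete_alt
  simp only [totalA_eq]
  rw [foldA_eq, foldB_eq _ _ _ _ (by omega)]
  have hs := mdSpec_le s.toList
  omega
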